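-- pv_equiv track=rewrite | github.com/vengatesh99/leetcode-solutions | 1232-sum-of-mutated-array-closest-to-target/sum-of-mutated-array-closest-to-target.py | findBestValue
-- ===== SOURCE A (Python) =====
-- from typing import List
--
-- def findBestValue(arr: List[int], target: int) -> int:
--     left,right = 1,max(arr)
--     diff = float("-inf")
--     def sumNew(mid):
--         sum = 0
--         for num in arr:
--             if num>mid:
--                 sum+=mid
--             else:
--                 sum+=num
--         return sum
--     while left<right:
--         mid = left+(right-left)//2
--         sum = sumNew(mid)
--         if sum>target:
--             right = mid
--         else:
--             left = mid+1
--     if abs(sumNew(left-1)-target) <= abs(sumNew(left)-target):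
--         return left-1
--     return left
-- ===== SOURCE B (Python) =====
-- from typing import List
--
-- def findBestValue(arr: List[int], target: int) -> int:
--     a = sorted(arr)
--     # L = the binary-search landing point, found arithmetically: walk the sorted
--     # array; while all remaining elements are >= the cap, the capped sum is
--     # prefix + r*cap, so the least cap exceeding target is a direct division.
--     prefix = 0
--     r = len(a)
--     L = a[-1]
--     for x in a:
--         v0 = (target - prefix) // r + 1
--         if v0 <= x:
--             L = v0
--             break
--         prefix += x
--         r -= 1
--     if L < 1:
--         L = 1
--     s_lo = sum(y if y <= L - 1 else L - 1 for y in a)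
--     s_hi = sum(y if y <= L else L for y in a)
--     if abs(s_lo - target) <= abs(s_hi - target):
--         return L - 1
--     return L
-- ===== Notes on version B (the rewrite author's own statement) =====
-- stated objective: alternative
-- what changed: Instead of binary-searching candidate cap values with an O(n) re-summation per probe, B sorts the array once and walks it with a running prefix sum, computing the binary search's landing point L arithmetically (least cap v with prefix + remaining*v > target) by one integer division per segment, then does the same final |sum-target| tie-break (<= prefers the smaller cap) as A.
import Mathlib
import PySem

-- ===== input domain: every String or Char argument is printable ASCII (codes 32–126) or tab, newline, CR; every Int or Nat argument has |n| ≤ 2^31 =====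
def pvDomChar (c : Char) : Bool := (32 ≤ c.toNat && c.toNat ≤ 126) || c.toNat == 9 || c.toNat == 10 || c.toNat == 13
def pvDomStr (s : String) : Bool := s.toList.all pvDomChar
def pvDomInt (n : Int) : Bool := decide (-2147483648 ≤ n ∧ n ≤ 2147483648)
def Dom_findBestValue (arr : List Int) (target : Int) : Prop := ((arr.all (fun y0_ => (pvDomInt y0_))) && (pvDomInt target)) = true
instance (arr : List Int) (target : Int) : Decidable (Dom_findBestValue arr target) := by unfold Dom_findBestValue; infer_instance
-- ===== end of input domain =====

-- B replaces A's binary search over cap values (O(n) re-summation per probe) by one sort plus an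
-- arithmetic prefix-sum walk; same return value, A's argument is never mutated by either version.

-- ===== PORT A =====
def sumNewA (arr : List Int) (mid : Int) : Int :=
  arr.foldl (fun s num => if num > mid then s + mid else s + num) 0

def bsLoop (arr : List Int) (target : Int) (left right : Int) : Int :=
  if left < right then
    let mid := left + PySem.Int.floordiv (right - left) 2
    if sumNewA arr mid > target then bsLoop arr target left mid
    else bsLoop arr target (mid + 1) right
  else left
termination_by (right - left).toNat
decreasing_by
  · have h2 : PySem.Int.floordiv (right - left) 2 = (right - left) / 2 :=
      PySem.Int.floordiv_eq_ediv_of_pos (by norm_num)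
    simp only [h2]; omega
  · have h2 : PySem.Int.floordiv (right - left) 2 = (right - left) / 2 :=
      PySem.Int.floordiv_eq_ediv_of_pos (by norm_num)
    simp only [h2]; omega

def findBestValue (arr : List Int) (target : Int) : Int :=
  match PySem.List.max? arr (fun x => x) with
  | none => 0  -- max([]) raises ValueError; excluded by Pre_
  | some m =>
    let left := bsLoop arr target 1 m
    if |sumNewA arr (left - 1) - target| ≤ |sumNewA arr left - target| then left - 1
    else left

-- ===== PORT B =====
def cappedSum (a : List Int) (v : Int) : Int :=
  (a.map (fun y => if y ≤ v then y else v)).sum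

def segLoop (target : Int) : List Int → Int → Int → Int → Int
  | [], _pfx, _r, L => L
  | x :: rest, pfx, r, L =>
    let v0 := PySem.Int.floordiv (target - pfx) r + 1
    if v0 ≤ x then v0
    else segLoop target rest (pfx + x) (r - 1) L

def findBestValue_alt (arr : List Int) (target : Int) : Int :=
  let a := PySem.List.sorted arr (fun x => x) false
  let L0 := segLoop target a 0 (a.length : Int) (PySem.List.pyGetD a (-1) 0)  -- a[-1] raises on []; excluded by Pre_
  let L := if L0 < 1 then 1 else L0
  let sLo := cappedSum a (L - 1)
  let sHi := cappedSum a L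
  if |sLo - target| ≤ |sHi - target| then L - 1 else L

-- ===== PRECONDITION & SPEC =====
-- Pre_ excludes only the empty list, on which A's max(arr) raises ValueError (B's a[-1] raises IndexError).
def Pre_findBestValue (arr : List Int) (target : Int) : Prop := arr ≠ []
instance (arr : List Int) (target : Int) : Decidable (Pre_findBestValue arr target) := by unfold Pre_findBestValue; infer_instance
def pvWitness_findBestValue : List Int × Int := ([2, 7, 4], 10)

def Spec_findBestValue (arr : List Int) (target : Int) (out : Int) : Prop := out = findBestValue_alt arr target
instance (arr : List Int) (target : Int) (out : Int) : Decidable (Spec_findBestValue arr target out) := by unfold Spec_findBestValue; infer_instance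

-- ===== CLAIM (what is proved, stated in full; the proofs are below) =====
def Claim_equal_findBestValue : Prop := ∀ (arr : List Int) (target : Int), Dom_findBestValue arr target → Pre_findBestValue arr target → Spec_findBestValue arr target (findBestValue arr target)

-- ===== LEMMAS AND PROOFS =====

-- Ssum l v = sum of min(y, v) over l; common semantic core of both ports' capped sums.
def Ssum (l : List Int) (v : Int) : Int := (l.map (fun y => min y v)).sum

theorem sumNewA_eq (arr : List Int) (v : Int) : sumNewA arr v = Ssum arr v := by
  have h : ∀ (l : List Int) (s : Int),
      l.foldl (fun s num => if num > v then s + v else s + num) s = s + Ssum l v := by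
    intro l
    induction l with
    | nil => intro s; simp [Ssum]
    | cons x t ih =>
      intro s
      simp only [List.foldl_cons, ih, Ssum, List.map_cons, List.sum_cons]
      split_ifs with h1 <;> omega
  simpa [sumNewA] using h arr 0

theorem cappedSum_eq (a : List Int) (v : Int) : cappedSum a v = Ssum a v := by
  simp only [cappedSum, Ssum, min_def]

theorem Ssum_perm {l l' : List Int} (h : l.Perm l') (v : Int) : Ssum l v = Ssum l' v :=
  (h.map _).sum_eq

theorem Ssum_mono (l : List Int) {v w : Int} (h : v ≤ w) : Ssum l v ≤ Ssum l w := by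
  unfold Ssum
  exact List.sum_le_sum (fun y _ => by omega)

theorem Ssum_split (c rest : List Int) (v : Int) (hc : ∀ y ∈ c, y ≤ v) (hr : ∀ y ∈ rest, v ≤ y) :
    Ssum (c ++ rest) v = c.sum + (rest.length : Int) * v := by
  unfold Ssum
  rw [List.map_append, List.sum_append]
  have h1 : List.map (fun y => min y v) c = List.map id c :=
    List.map_congr_left (fun y hy => min_eq_left (hc y hy))
  have h2 : List.map (fun y => min y v) rest = List.map (fun _ => v) rest :=
    List.map_congr_left (fun y hy => min_eq_right (hr y hy))
  rw [h1, h2, List.map_id, PySem.List.sum_map_const_int]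

-- the landing point is unique: 1 ≤ L ≤ m, everything in [1, L) has capped sum ≤ target, and L = m or its sum exceeds target
theorem L_unique (S : Int → Int) (m target L1 L2 : Int)
    (p1 : 1 ≤ L1 ∧ L1 ≤ m) (q1 : ∀ v, 1 ≤ v → v < L1 → S v ≤ target) (r1 : L1 = m ∨ S L1 > target)
    (p2 : 1 ≤ L2 ∧ L2 ≤ m) (q2 : ∀ v, 1 ≤ v → v < L2 → S v ≤ target) (r2 : L2 = m ∨ S L2 > target) :
    L1 = L2 := by
  by_contra hne
  rcases lt_or_gt_of_ne hne with h | h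
  · have hs := q2 L1 p1.1 h
    rcases r1 with rfl | hgt
    · omega
    · omega
  · have hs := q1 L2 p2.1 h
    rcases r2 with rfl | hgt
    · omega
    · omega

theorem bsLoop_spec (arr : List Int) (target m : Int) : ∀ (left right : Int),
    1 ≤ left → left ≤ right → right ≤ m →
    (∀ v, 1 ≤ v → v < left → sumNewA arr v ≤ target) →
    (right = m ∨ sumNewA arr right > target) →
    (1 ≤ bsLoop arr target left right ∧ bsLoop arr target left right ≤ m) ∧
    (∀ v, 1 ≤ v → v < bsLoop arr target left right → sumNewA arr v ≤ target) ∧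
    (bsLoop arr target left right = m ∨ sumNewA arr (bsLoop arr target left right) > target) := by
  intro left right
  induction left, right using bsLoop.induct (arr := arr) (target := target) with
  | case1 left right hlt mid hsum ih =>
    intro h1 h2 h3 hlo hhi
    have hmid : mid = left + PySem.Int.floordiv (right - left) 2 := rfl
    have hfd : PySem.Int.floordiv (right - left) 2 = (right - left) / 2 :=
      PySem.Int.floordiv_eq_ediv_of_pos (by norm_num)
    have hmb : left ≤ mid ∧ mid < right := by rw [hmid, hfd]; omega
    have heq : bsLoop arr target left right = bsLoop arr target left mid := by
      rw [bsLoop]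
      simp only [if_pos hlt]
      rw [if_pos hsum]
    rw [heq]
    exact ih h1 hmb.1 (by omega) hlo (Or.inr hsum)
  | case2 left right hlt mid hsum ih =>
    intro h1 h2 h3 hlo hhi
    have hmid : mid = left + PySem.Int.floordiv (right - left) 2 := rfl
    have hfd : PySem.Int.floordiv (right - left) 2 = (right - left) / 2 :=
      PySem.Int.floordiv_eq_ediv_of_pos (by norm_num)
    have hmb : left ≤ mid ∧ mid < right := by rw [hmid, hfd]; omega
    have heq : bsLoop arr target left right = bsLoop arr target (mid + 1) right := by
      rw [bsLoop]
      simp only [if_pos hlt]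
      rw [if_neg hsum]
    rw [heq]
    refine ih (by omega) (by omega) h3 ?_ hhi
    intro v hv1 hv2
    by_cases hvl : v < left
    · exact hlo v hv1 hvl
    · have hmono : sumNewA arr v ≤ sumNewA arr mid := by
        rw [sumNewA_eq, sumNewA_eq]
        exact Ssum_mono arr (by omega)
      omega
  | case3 left right hnlt =>
    intro h1 h2 h3 hlo hhi
    have hlr : left = right := by omega
    have heq : bsLoop arr target left right = left := by
      rw [bsLoop]; rw [if_neg hnlt]
    rw [heq]
    subst hlr
    exact ⟨⟨h1, h3⟩, hlo, hhi⟩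

theorem segLoop_spec (target m : Int) (a : List Int) (hsort : a.Pairwise (· ≤ ·))
    (hmax : ∀ y ∈ a, y ≤ m) (hmem : m ∈ a) :
    ∀ (rest c : List Int), a = c ++ rest →
    (∀ y ∈ c, Ssum a y ≤ target) →
    (c = [] ∨ ∃ y ∈ c, (∀ z ∈ c, z ≤ y) ∧ c.sum + (rest.length : Int) * y ≤ target) →
    segLoop target rest c.sum (rest.length : Int) m ≤ m ∧
    (∀ v, v < segLoop target rest c.sum (rest.length : Int) m → Ssum a v ≤ target) ∧
    (segLoop target rest c.sum (rest.length : Int) m = m ∨ Ssum a (segLoop target rest c.sum (rest.length : Int) m) > target) := by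
  intro rest
  induction rest with
  | nil =>
    intro c hac H1 _H2
    have hma : Ssum a m ≤ target := H1 m (by rw [hac] at hmem; simpa using hmem)
    refine ⟨?_, ?_, ?_⟩ <;> simp only [segLoop]
    · exact le_refl m
    · intro v hv
      exact le_trans (Ssum_mono a (le_of_lt hv)) hma
    · exact Or.inl (by trivial)
  | cons x rest' ih =>
    intro c hac H1 H2
    have hxa : x ∈ a := by rw [hac]; simp
    have hs2 : (c ++ x :: rest').Pairwise (· ≤ ·) := hac ▸ hsort
    obtain ⟨hpc, hpxr, hcross⟩ := List.pairwise_append.mp hs2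
    have hxr : ∀ w ∈ rest', x ≤ w := (List.pairwise_cons.mp hpxr).1
    have hr_pos : (0:Int) < ((x :: rest').length : Int) := by
      exact_mod_cast List.length_pos_iff.mpr (List.cons_ne_nil x rest')
    set r : Int := ((x :: rest').length : Int) with hrdef
    set fd : Int := PySem.Int.floordiv (target - c.sum) r with hfddef
    -- bracket facts for the integer division
    have hB : ∀ v : Int, v ≤ fd → c.sum + r * v ≤ target := by
      intro v hv
      have := (PySem.Int.le_floordiv_iff_mul_le hr_pos).mp hv
      nlinarith [this]
    have hA : target < c.sum + r * (fd + 1) := by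
      have : ¬ (fd + 1 ≤ fd) := by omega
      have h2 := (PySem.Int.le_floordiv_iff_mul_le (a := target - c.sum) (b := r) (q := fd + 1) hr_pos)
      rw [← hfddef] at h2
      have h3 : ¬ ((fd + 1) * r ≤ target - c.sum) := fun hc => this (h2.mpr hc)
      nlinarith [h3]
    have hx_le_m : x ≤ m := hmax x hxa
    -- evaluate one step of segLoop
    have hstep : segLoop target (x :: rest') c.sum r m =
        if fd + 1 ≤ x then fd + 1 else segLoop target rest' (c.sum + x) (r - 1) m := by
      simp only [segLoop]
      rw [hfddef]
    by_cases hbr : fd + 1 ≤ x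
    · -- break: the answer is v0 = fd + 1
      rw [hstep, if_pos hbr]
      -- every element of c is < v0
      have hyc : ∀ z ∈ c, z < fd + 1 := by
        rcases H2 with rfl | ⟨y, hymem, hyub, hylin⟩
        · intro z hz; simp at hz
        · intro z hz
          have hzy := hyub z hz
          by_contra hge
          push_neg at hge
          have hyv : fd + 1 ≤ y := le_trans hge hzy
          have := mul_le_mul_of_nonneg_left hyv (le_of_lt hr_pos)
          nlinarith [hylin, hA, this]
      have hsplitv0 : Ssum a (fd + 1) = c.sum + r * (fd + 1) := by
        rw [hac, Ssum_split c (x :: rest') (fd + 1) (fun z hz => le_of_lt (hyc z hz))]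
        intro w hw
        rcases List.mem_cons.mp hw with rfl | hw'
        · exact hbr
        · exact le_trans hbr (hxr w hw')
      refine ⟨le_trans hbr hx_le_m, ?_, Or.inr (by rw [hsplitv0]; exact hA)⟩
      intro v hv
      by_cases hvc : ∀ z ∈ c, z ≤ v
      · have hsplitv : Ssum a v = c.sum + r * v := by
          rw [hac, Ssum_split c (x :: rest') v hvc]
          intro w hw
          rcases List.mem_cons.mp hw with rfl | hw'
          · omega
          · have := hxr w hw'; omega
        rw [hsplitv]
        exact hB v (by omega)
      · push_neg at hvc
        obtain ⟨z, hz, hvz⟩ := hvc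
        exact le_trans (Ssum_mono a (le_of_lt hvz)) (H1 z hz)
    · -- no break: recurse with c ++ [x]
      rw [hstep, if_neg hbr]
      have hxfd : x ≤ fd := by omega
      have hBx : c.sum + r * x ≤ target := hB x hxfd
      have hSx : Ssum a x = c.sum + r * x := by
        rw [hac, Ssum_split c (x :: rest') x (fun z hz => hcross z hz x (by simp))]
        intro w hw
        rcases List.mem_cons.mp hw with h | hw'
        · exact le_of_eq h.symm
        · exact hxr w hw'
      have H1' : ∀ y ∈ c ++ [x], Ssum a y ≤ target := by
        intro y hy
        rcases List.mem_append.mp hy with hy' | hy'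
        · exact H1 y hy'
        · have : y = x := by simpa using hy'
          subst this
          rw [hSx]; exact hBx
      have H2' : (c ++ [x]) = [] ∨ ∃ y ∈ c ++ [x], (∀ z ∈ c ++ [x], z ≤ y) ∧
          (c ++ [x]).sum + ((rest' : List Int).length : Int) * y ≤ target := by
        refine Or.inr ⟨x, by simp, ?_, ?_⟩
        · intro z hz
          rcases List.mem_append.mp hz with hz' | hz'
          · exact hcross z hz' x (by simp)
          · simp at hz'; omega
        · have hsum : (c ++ [x]).sum = c.sum + x := by simp
          have hlen : ((rest' : List Int).length : Int) = r - 1 := by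
            rw [hrdef]; simp only [List.length_cons]; push_cast; ring
          rw [hsum, hlen]
          nlinarith [hBx]
      have hres := ih (c ++ [x]) (by rw [hac]; simp) H1' H2'
      have hargs : (c ++ [x]).sum = c.sum + x := by simp
      have hlen : ((rest' : List Int).length : Int) = r - 1 := by
        rw [hrdef]; simp only [List.length_cons]; push_cast; ring
      rw [hargs, hlen] at hres
      exact hres


-- ===== VERDICT (by name: the statement is the Claim_ definition above) =====
theorem findBestValue_spec : Claim_equal_findBestValue := by
  intro arr target _hdom hpre
  unfold Pre_findBestValue at hpre
  unfold Spec_findBestValue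
  -- A's max
  obtain ⟨mA, hmA⟩ : ∃ mA, PySem.List.max? arr (fun x => x) = some mA := by
    cases h : PySem.List.max? arr (fun x => x) with
    | none => exact absurd ((PySem.List.max?_eq_none_iff arr _).mp h) hpre
    | some mA => exact ⟨mA, rfl⟩
  have hmA_mem : mA ∈ arr := PySem.List.max?_mem hmA
  have hmA_max : ∀ y ∈ arr, y ≤ mA := PySem.List.max?_isMax hmA
  -- B's sorted list
  set a := PySem.List.sorted arr (fun x => x) false with ha
  have haperm : a.Perm arr := PySem.List.sorted_perm arr _ false
  have hane : a ≠ [] := fun h => hpre ((PySem.List.sorted_eq_nil_iff arr _ false).mp (ha ▸ h))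
  have hsort : a.Pairwise (· ≤ ·) := PySem.List.sorted_pairwise arr (fun x => x)
  have hlen : 0 < a.length := List.length_pos_iff.mpr hane
  -- mB = a[-1] is the maximum of a
  have hmB_def : PySem.List.pyGetD a (-1) 0 = a[a.length - 1]'(by omega) := by
    unfold PySem.List.pyGetD
    rw [PySem.List.pyGet?_neg a (by norm_num) (by omega)]
    norm_num
    rw [List.getElem?_eq_getElem (by omega)]
    rfl
  have hmB_mem : PySem.List.pyGetD a (-1) 0 ∈ a := by
    rw [hmB_def]; exact List.getElem_mem _
  have hmB_max : ∀ y ∈ a, y ≤ PySem.List.pyGetD a (-1) 0 := by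
    intro y hy
    obtain ⟨i, hi, rfl⟩ := List.mem_iff_getElem.mp hy
    rw [hmB_def]
    by_cases hil : i < a.length - 1
    · exact (List.pairwise_iff_getElem.mp hsort) i (a.length - 1) hi (by omega) hil
    · have hieq : i = a.length - 1 := by omega
      subst hieq; exact le_refl _
  have hm_eq : PySem.List.pyGetD a (-1) 0 = mA :=
    le_antisymm (hmA_max _ (haperm.subset hmB_mem)) (hmB_max mA (haperm.mem_iff.mpr hmA_mem))
  -- sums bridge
  have hSs : ∀ v, sumNewA arr v = Ssum a v := fun v => by
    rw [sumNewA_eq]; exact (Ssum_perm haperm v).symm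
  -- B's landing point
  have hseg := segLoop_spec target (PySem.List.pyGetD a (-1) 0) a hsort hmB_max hmB_mem a [] (by simp) (by simp) (Or.inl rfl)
  simp only [List.sum_nil] at hseg
  set L0 := segLoop target a 0 (a.length : Int) (PySem.List.pyGetD a (-1) 0) with hL0
  set L : Int := if L0 < 1 then 1 else L0 with hL
  -- A's landing point equals B's
  have hLL : bsLoop arr target 1 mA = L := by
    by_cases hm1 : 1 ≤ mA
    · have hbs := bsLoop_spec arr target mA 1 mA le_rfl hm1 le_rfl
        (fun v hv1 hv2 => absurd hv2 (by omega)) (Or.inl rfl)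
      simp only [hSs] at hbs
      rw [hm_eq] at hseg
      refine L_unique (Ssum a) mA target _ L hbs.1 hbs.2.1 hbs.2.2 ?_ ?_ ?_
      · constructor
        · rw [hL]; split <;> omega
        · rw [hL]; split
          · omega
          · exact hseg.1
      · intro v hv1 hv2
        rw [hL] at hv2
        split at hv2
        · omega
        · exact hseg.2.1 v hv2
      · rw [hL]; split
        · rename_i hlt
          rcases hseg.2.2 with he | hgt
          · omega
          · exact Or.inr (lt_of_lt_of_le hgt (Ssum_mono a (by omega)))
        · exact hseg.2.2
    · -- mA ≤ 0 : both landing points are 1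
      have h1 : bsLoop arr target 1 mA = 1 := by rw [bsLoop]; rw [if_neg (by omega)]
      have h2 : L = 1 := by
        have hub := hseg.1
        rw [hL, if_pos (by omega)]
      rw [h1, h2]
  -- assemble the two ports
  have hAeq : findBestValue arr target =
      (if |sumNewA arr (bsLoop arr target 1 mA - 1) - target| ≤
          |sumNewA arr (bsLoop arr target 1 mA) - target|
       then bsLoop arr target 1 mA - 1 else bsLoop arr target 1 mA) := by
    unfold findBestValue
    rw [hmA]
  have hBeq : findBestValue_alt arr target =
      (if |cappedSum a (L - 1) - target| ≤ |cappedSum a L - target| then L - 1 else L) := by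
    rw [hL, hL0, ha]
    rfl
  rw [hAeq, hBeq, hLL]
  simp only [hSs, cappedSum_eq]
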